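-- pv_equiv track=rewrite | github.com/fxbin/virtual-intelligent-dev-team | scripts/materialize_candidate_patch.py | parse_json_pointer
-- ===== SOURCE A (Python) =====
-- def parse_json_pointer(pointer: object, op: str) -> list[str]:
--     if not isinstance(pointer, str):
--         raise RuntimeError(f"{op} requires a string pointer")
--     if pointer == "":
--         return []
--     if not pointer.startswith("/"):
--         raise RuntimeError(f"{op} pointer must be empty or start with '/': {pointer}")
--     return [
--         token.replace("~1", "/").replace("~0", "~")
--         for token in pointer.split("/")[1:]
--     ]
-- ===== SOURCE B (Python) =====
-- def parse_json_pointer(pointer: object, op: str) -> list[str]: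
--     if not isinstance(pointer, str):
--         raise RuntimeError(f"{op} requires a string pointer")
--     if pointer == "":
--         return []
--     if not pointer.startswith("/"):
--         raise RuntimeError(f"{op} pointer must be empty or start with '/': {pointer}")
--     tokens = []
--     buf = []
--     n = len(pointer)
--     i = 1
--     while i < n:
--         c = pointer[i]
--         if c == '/':
--             tokens.append(''.join(buf))
--             buf = []
--             i += 1
--         elif c == '~' and i + 1 < n and pointer[i + 1] == '1':
--             buf.append('/')
--             i += 2
--         elif c == '~' and i + 1 < n and pointer[i + 1] == '0':
--             buf.append('~')
--             i += 2
--         else: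
--             buf.append(c)
--             i += 1
--     tokens.append(''.join(buf))
--     return tokens
-- ===== Notes on version B (the rewrite author's own statement) =====
-- stated objective: alternative
-- what changed: Replaced split('/') plus two sequential whole-token str.replace passes ('~1' then '~0') by a single left-to-right character scan with a token buffer that splits and unescapes in one pass using one character of lookahead.
import Mathlib
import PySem

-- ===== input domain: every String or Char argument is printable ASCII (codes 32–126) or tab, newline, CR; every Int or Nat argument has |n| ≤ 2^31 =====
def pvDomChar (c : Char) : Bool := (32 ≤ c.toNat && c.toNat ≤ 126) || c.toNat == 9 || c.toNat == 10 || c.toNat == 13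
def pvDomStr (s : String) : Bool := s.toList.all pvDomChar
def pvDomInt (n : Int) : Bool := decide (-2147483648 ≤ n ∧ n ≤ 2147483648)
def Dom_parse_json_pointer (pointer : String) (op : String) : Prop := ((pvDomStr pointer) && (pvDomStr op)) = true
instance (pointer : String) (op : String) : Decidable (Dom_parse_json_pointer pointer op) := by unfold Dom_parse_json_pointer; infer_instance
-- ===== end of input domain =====

-- B replaces split('/') followed by two whole-token replace passes by a single left-to-right
-- character scan with a token buffer (one pass, no intermediate token list); objective: alternative.

-- ===== PORT A =====
-- literal transliteration of A; the two `raise RuntimeError` branches (non-str pointer is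
-- impossible under the String signature; pointer not starting with '/') return [] here and are
-- excluded by Pre_parse_json_pointer.
def parse_json_pointer (pointer : String) (op : String) : List String :=
  if pointer = "" then []
  else if PySem.Str.startswith pointer "/" = false then []  -- Python raises RuntimeError here
  else
    match PySem.Str.split? pointer "/" with
    | none => []   -- unreachable: separator "/" is nonempty
    | some toks =>
      (toks.drop 1).map (fun t => PySem.Str.replace (PySem.Str.replace t "~1" "/") "~0" "~")

-- ===== PORT B =====
-- the character-scanning loop of Source B: buf is the current token (reversed), one step per char,
-- '~'-escapes decided by one character of lookahead
def pvAltLoop : List Char → List Char → List String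
  | [], buf => [String.ofList buf.reverse]
  | [c], buf =>
    if c = '/' then String.ofList buf.reverse :: pvAltLoop [] []
    else pvAltLoop [] (c :: buf)
  | c :: d :: rest2, buf =>
    if c = '/' then String.ofList buf.reverse :: pvAltLoop (d :: rest2) []
    else if c = '~' ∧ d = '1' then pvAltLoop rest2 ('/' :: buf)
    else if c = '~' ∧ d = '0' then pvAltLoop rest2 ('~' :: buf)
    else pvAltLoop (d :: rest2) (c :: buf)

def parse_json_pointer_alt (pointer : String) (op : String) : List String :=
  if pointer = "" then []
  else if PySem.Str.startswith pointer "/" = false then []  -- Python raises RuntimeError here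
  else pvAltLoop (pointer.toList.drop 1) []

-- ===== PRECONDITION & SPEC =====
-- Pre_ excludes exactly the inputs where A raises RuntimeError: a nonempty pointer that does not
-- start with '/'.  (The non-str RuntimeError branch is unreachable under the String signature.)
def Pre_parse_json_pointer (pointer : String) (op : String) : Prop :=
  pointer = "" ∨ PySem.Str.startswith pointer "/" = true
instance (pointer : String) (op : String) : Decidable (Pre_parse_json_pointer pointer op) := by
  unfold Pre_parse_json_pointer; infer_instance

def pvWitness_parse_json_pointer : String × String := ("/a~1b/c~0", "add")

def Spec_parse_json_pointer (pointer : String) (op : String) (out : List String) : Prop :=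
  out = parse_json_pointer_alt pointer op
instance (pointer : String) (op : String) (out : List String) : Decidable (Spec_parse_json_pointer pointer op out) := by
  unfold Spec_parse_json_pointer; infer_instance

-- ===== CLAIM =====
def Claim_equal_parse_json_pointer : Prop :=
  ∀ (pointer : String) (op : String), Dom_parse_json_pointer pointer op →
    Pre_parse_json_pointer pointer op →
    Spec_parse_json_pointer pointer op (parse_json_pointer pointer op)

-- ===== LEMMAS AND PROOFS =====

-- specification-side split on '/': list of tokens (always nonempty)
def splitStd : List Char → List (List Char)
  | [] => [[]]
  | c :: r =>
    if c = '/' then [] :: splitStd r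
    else
      match splitStd r with
      | [] => [[c]]
      | t :: ts => (c :: t) :: ts

-- one-pass unescape ('~1' → '/', '~0' → '~')
def unesc : List Char → List Char
  | [] => []
  | [c] => [c]
  | c :: d :: r =>
    if c = '~' ∧ d = '1' then '/' :: unesc r
    else if c = '~' ∧ d = '0' then '~' :: unesc r
    else c :: unesc (d :: r)

-- the two replace passes of A, as simple recursions
def rep1 : List Char → List Char
  | [] => []
  | [c] => [c]
  | c :: d :: r => if c = '~' ∧ d = '1' then '/' :: rep1 r else c :: rep1 (d :: r)

def rep0 : List Char → List Char
  | [] => []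
  | [c] => [c]
  | c :: d :: r => if c = '~' ∧ d = '0' then '~' :: rep0 r else c :: rep0 (d :: r)

theorem splitStd_ne_nil (cs : List Char) : splitStd cs ≠ [] := by
  cases cs with
  | nil => simp [splitStd]
  | cons c r =>
    simp only [splitStd]
    split
    · simp
    · cases h : splitStd r <;> simp

theorem splitStd_surj (l : List Char) : ∃ t ts, splitStd l = t :: ts := by
  cases hx : splitStd l with
  | nil => exact absurd hx (splitStd_ne_nil l)
  | cons t ts => exact ⟨t, ts, rfl⟩

theorem splitStd_slash (r : List Char) : splitStd ('/' :: r) = [] :: splitStd r := by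
  simp [splitStd]

theorem splitStd_cons_ne (c : Char) (r : List Char) (t : List Char) (ts : List (List Char))
    (hc : c ≠ '/') (h : splitStd r = t :: ts) : splitStd (c :: r) = (c :: t) :: ts := by
  simp only [splitStd]
  rw [if_neg hc, h]

theorem unesc_t1 (r : List Char) : unesc ('~' :: '1' :: r) = '/' :: unesc r := by
  simp [unesc]

theorem unesc_t0 (r : List Char) : unesc ('~' :: '0' :: r) = '~' :: unesc r := by
  simp [unesc, show ('0' : Char) ≠ '1' from by decide]

theorem unesc_not (c d : Char) (r : List Char) (h1 : ¬(c = '~' ∧ d = '1')) (h0 : ¬(c = '~' ∧ d = '0')) :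
    unesc (c :: d :: r) = c :: unesc (d :: r) := by
  simp only [unesc]; rw [if_neg h1, if_neg h0]

theorem unesc_cons_ne (c : Char) (l : List Char) (h : c ≠ '~') : unesc (c :: l) = c :: unesc l := by
  cases l with
  | nil => simp [unesc]
  | cons d r => exact unesc_not c d r (fun h' => h h'.1) (fun h' => h h'.1)

theorem unesc_cons_tilde (l : List Char) (h0 : l.head? ≠ some '0') (h1 : l.head? ≠ some '1') :
    unesc ('~' :: l) = '~' :: unesc l := by
  cases l with
  | nil => simp [unesc]
  | cons d r =>
    have hd0 : d ≠ '0' := by simpa using h0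
    have hd1 : d ≠ '1' := by simpa using h1
    exact unesc_not '~' d r (fun h' => hd1 h'.2) (fun h' => hd0 h'.2)

theorem rep1_t1 (r : List Char) : rep1 ('~' :: '1' :: r) = '/' :: rep1 r := by
  simp [rep1]

theorem rep1_not (c d : Char) (r : List Char) (h : ¬(c = '~' ∧ d = '1')) :
    rep1 (c :: d :: r) = c :: rep1 (d :: r) := by
  simp only [rep1]; rw [if_neg h]

theorem rep0_t0 (r : List Char) : rep0 ('~' :: '0' :: r) = '~' :: rep0 r := by
  simp [rep0]

theorem rep0_not (c d : Char) (r : List Char) (h : ¬(c = '~' ∧ d = '0')) :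
    rep0 (c :: d :: r) = c :: rep0 (d :: r) := by
  simp only [rep0]; rw [if_neg h]

theorem rep1_cons_ne (c : Char) (l : List Char) (h : c ≠ '~') : rep1 (c :: l) = c :: rep1 l := by
  cases l with
  | nil => simp [rep1]
  | cons d r => exact rep1_not c d r (fun h' => h h'.1)

theorem rep0_cons_ne (c : Char) (l : List Char) (h : c ≠ '~') : rep0 (c :: l) = c :: rep0 l := by
  cases l with
  | nil => simp [rep0]
  | cons d r => exact rep0_not c d r (fun h' => h h'.1)

theorem rep0_cons_tilde (l : List Char) (h : l.head? ≠ some '0') :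
    rep0 ('~' :: l) = '~' :: rep0 l := by
  cases l with
  | nil => simp [rep0]
  | cons d r =>
    have hd : d ≠ '0' := by simpa using h
    exact rep0_not '~' d r (fun h' => hd h'.2)

theorem rep1_head (d : Char) (r : List Char) :
    (rep1 (d :: r)).head? = some d ∨ (rep1 (d :: r)).head? = some '/' := by
  cases r with
  | nil => simp [rep1]
  | cons e r' =>
    simp only [rep1]
    split
    · right; simp
    · left; simp

theorem replace_go1 : ∀ (fuel : Nat) (l acc : List Char), l.length ≤ fuel →
    PySem.Chars.replace.go ['~','1'] ['/'] fuel l acc = acc.reverse ++ rep1 l := by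
  intro fuel
  induction fuel with
  | zero =>
    intro l acc h
    have hl : l = [] := by cases l <;> simp_all
    subst hl
    simp [PySem.Chars.replace.go, rep1]
  | succ n ih =>
    intro l acc h
    cases l with
    | nil => simp [PySem.Chars.replace.go, rep1]
    | cons c t =>
      cases t with
      | nil =>
        simp only [PySem.Chars.replace.go]
        rw [if_neg (by simp)]
        show PySem.Chars.replace.go ['~','1'] ['/'] n [] (c :: acc) = _
        rw [ih [] (c :: acc) (by simp)]
        simp [rep1]
      | cons d r =>
        by_cases hcd : c = '~' ∧ d = '1'
        · obtain ⟨hc, hd⟩ := hcd; subst hc; subst hd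
          simp only [PySem.Chars.replace.go]
          rw [if_pos (by simp)]
          show PySem.Chars.replace.go ['~','1'] ['/'] n r ('/' :: acc) = _
          rw [ih r ('/' :: acc) (by simp at h ⊢; omega)]
          rw [rep1_t1]
          simp
        · simp only [PySem.Chars.replace.go]
          rw [if_neg (by
            intro hcond; simp at hcond; obtain ⟨h1, h2⟩ := hcond
            exact hcd ⟨by first | exact h1 | exact h1.symm, by first | exact h2 | exact h2.symm⟩)]
          show PySem.Chars.replace.go ['~','1'] ['/'] n (d :: r) (c :: acc) = _
          rw [ih (d :: r) (c :: acc) (by simp at h ⊢; omega)]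
          rw [rep1_not c d r hcd]
          simp

theorem replace_go0 : ∀ (fuel : Nat) (l acc : List Char), l.length ≤ fuel →
    PySem.Chars.replace.go ['~','0'] ['~'] fuel l acc = acc.reverse ++ rep0 l := by
  intro fuel
  induction fuel with
  | zero =>
    intro l acc h
    have hl : l = [] := by cases l <;> simp_all
    subst hl
    simp [PySem.Chars.replace.go, rep0]
  | succ n ih =>
    intro l acc h
    cases l with
    | nil => simp [PySem.Chars.replace.go, rep0]
    | cons c t =>
      cases t with
      | nil =>
        simp only [PySem.Chars.replace.go]
        rw [if_neg (by simp)]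
        show PySem.Chars.replace.go ['~','0'] ['~'] n [] (c :: acc) = _
        rw [ih [] (c :: acc) (by simp)]
        simp [rep0]
      | cons d r =>
        by_cases hcd : c = '~' ∧ d = '0'
        · obtain ⟨hc, hd⟩ := hcd; subst hc; subst hd
          simp only [PySem.Chars.replace.go]
          rw [if_pos (by simp)]
          show PySem.Chars.replace.go ['~','0'] ['~'] n r ('~' :: acc) = _
          rw [ih r ('~' :: acc) (by simp at h ⊢; omega)]
          rw [rep0_t0]
          simp
        · simp only [PySem.Chars.replace.go]
          rw [if_neg (by
            intro hcond; simp at hcond; obtain ⟨h1, h2⟩ := hcond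
            exact hcd ⟨by first | exact h1 | exact h1.symm, by first | exact h2 | exact h2.symm⟩)]
          show PySem.Chars.replace.go ['~','0'] ['~'] n (d :: r) (c :: acc) = _
          rw [ih (d :: r) (c :: acc) (by simp at h ⊢; omega)]
          rw [rep0_not c d r hcd]
          simp

theorem replace1_eq (l : List Char) : PySem.Chars.replace l ['~','1'] ['/'] = rep1 l := by
  simp only [PySem.Chars.replace]
  rw [if_neg (by simp)]
  simpa using replace_go1 l.length l [] (le_refl _)

theorem replace0_eq (l : List Char) : PySem.Chars.replace l ['~','0'] ['~'] = rep0 l := by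
  simp only [PySem.Chars.replace]
  rw [if_neg (by simp)]
  simpa using replace_go0 l.length l [] (le_refl _)

-- A's two sequential replace passes equal the single scan
theorem rep0_rep1_eq_unesc (t : List Char) : rep0 (rep1 t) = unesc t := by
  fun_induction unesc t with
  | case1 => simp [rep1, rep0]
  | case2 c => simp [rep1, rep0]
  | case3 c d r hcd ih =>
    obtain ⟨hc, hd⟩ := hcd; subst hc; subst hd
    rw [rep1_t1, rep0_cons_ne '/' _ (by decide), ih]
  | case4 c d r hcd1 hcd0 ih =>
    obtain ⟨hc, hd⟩ := hcd0; subst hc; subst hd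
    rw [rep1_not _ _ _ (by decide), rep1_cons_ne '0' _ (by decide), rep0_t0, ih]
  | case5 c d r hcd1 hcd0 ih =>
    by_cases hc : c = '~'
    · subst hc
      have hd1 : d ≠ '1' := fun hh => hcd1 ⟨rfl, hh⟩
      have hd0 : d ≠ '0' := fun hh => hcd0 ⟨rfl, hh⟩
      rw [rep1_not _ _ _ (fun h' => hd1 h'.2)]
      have hh : (rep1 (d :: r)).head? ≠ some '0' := by
        rcases rep1_head d r with hx | hx
        · rw [hx]; simp [hd0]
        · rw [hx]; decide
      rw [rep0_cons_tilde _ hh, ih]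
    · rw [rep1_cons_ne c _ hc, rep0_cons_ne c _ hc, ih]

-- the fuel-based splitOn.go with separator ['/'] computes splitStd
theorem splitOn_go_char : ∀ (fuel : Nat) (l cur : List Char) (acc : List (List Char)),
    l.length ≤ fuel →
    PySem.Chars.splitOn.go ['/'] fuel l cur acc =
      acc.reverse ++ (match splitStd l with
                      | [] => []
                      | t :: ts => (cur.reverse ++ t) :: ts) := by
  intro fuel
  induction fuel with
  | zero =>
    intro l cur acc h
    have hl : l = [] := by cases l <;> simp_all
    subst hl
    simp [PySem.Chars.splitOn.go, splitStd]
  | succ n ih =>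
    intro l cur acc h
    cases l with
    | nil => simp [PySem.Chars.splitOn.go, splitStd]
    | cons c rest =>
      by_cases hc : c = '/'
      · subst hc
        simp only [PySem.Chars.splitOn.go]
        rw [if_pos (by simp)]
        show PySem.Chars.splitOn.go ['/'] n rest [] (cur.reverse :: acc) = _
        rw [ih rest [] (cur.reverse :: acc) (by simp at h ⊢; omega)]
        obtain ⟨t, ts, hts⟩ := splitStd_surj rest
        rw [splitStd_slash, hts]
        simp
      · simp only [PySem.Chars.splitOn.go]
        rw [if_neg (by intro hcond; simp at hcond; exact hc hcond.symm)]
        show PySem.Chars.splitOn.go ['/'] n rest (c :: cur) acc = _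
        rw [ih rest (c :: cur) acc (by simp at h ⊢; omega)]
        obtain ⟨t, ts, hts⟩ := splitStd_surj rest
        rw [hts, splitStd_cons_ne c rest t ts hc hts]
        simp

theorem splitOn_slash (l : List Char) : PySem.Chars.splitOn l ['/'] = splitStd l := by
  simp only [PySem.Chars.splitOn]
  rw [splitOn_go_char (l.length + 1) l [] [] (by omega)]
  obtain ⟨t, ts, hts⟩ := splitStd_surj l
  simp [hts]

-- B's scanning loop computes, token by token, the unescape of splitStd
theorem pvAltLoop_eq_aux : ∀ (n : Nat) (cs buf : List Char), cs.length ≤ n →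
    pvAltLoop cs buf =
      (match splitStd cs with
       | [] => []
       | t :: ts => String.ofList (buf.reverse ++ unesc t) ::
                    ts.map (fun u => String.ofList (unesc u))) := by
  intro n
  induction n with
  | zero =>
    intro cs buf h
    have hl : cs = [] := by cases cs <;> simp_all
    subst hl
    simp [pvAltLoop, splitStd, unesc]
  | succ n ih =>
    intro cs buf h
    match cs with
    | [] => simp [pvAltLoop, splitStd, unesc]
    | [c] =>
      by_cases hc : c = '/'
      · subst hc
        simp [pvAltLoop, splitStd, unesc]
      · simp [pvAltLoop, splitStd, hc, unesc]
    | c :: d :: rest2 =>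
      by_cases hc : c = '/'
      · subst hc
        rw [show pvAltLoop ('/' :: d :: rest2) buf
              = String.ofList buf.reverse :: pvAltLoop (d :: rest2) [] from by simp [pvAltLoop]]
        rw [ih (d :: rest2) [] (by simp at h ⊢; omega)]
        obtain ⟨t, ts, hts⟩ := splitStd_surj (d :: rest2)
        rw [splitStd_slash, hts]
        simp [unesc]
      · by_cases h1 : c = '~' ∧ d = '1'
        · obtain ⟨hc1, hd1⟩ := h1; subst hc1; subst hd1
          rw [show pvAltLoop ('~' :: '1' :: rest2) buf = pvAltLoop rest2 ('/' :: buf) from by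
            simp [pvAltLoop, show ('~' : Char) ≠ '/' from by decide]]
          rw [ih rest2 ('/' :: buf) (by simp at h ⊢; omega)]
          obtain ⟨t, ts, hts⟩ := splitStd_surj rest2
          rw [hts, splitStd_cons_ne '~' _ ('1' :: t) ts hc
                (splitStd_cons_ne '1' rest2 t ts (by decide) hts)]
          simp [unesc_t1]
        · by_cases h0 : c = '~' ∧ d = '0'
          · obtain ⟨hc1, hd1⟩ := h0; subst hc1; subst hd1
            rw [show pvAltLoop ('~' :: '0' :: rest2) buf = pvAltLoop rest2 ('~' :: buf) from by
              simp [pvAltLoop, show ('~' : Char) ≠ '/' from by decide,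
                    show ('0' : Char) ≠ '1' from by decide]]
            rw [ih rest2 ('~' :: buf) (by simp at h ⊢; omega)]
            obtain ⟨t, ts, hts⟩ := splitStd_surj rest2
            rw [hts, splitStd_cons_ne '~' _ ('0' :: t) ts hc
                  (splitStd_cons_ne '0' rest2 t ts (by decide) hts)]
            simp [unesc_t0]
          · rw [show pvAltLoop (c :: d :: rest2) buf = pvAltLoop (d :: rest2) (c :: buf) from by
              simp only [pvAltLoop]; rw [if_neg hc, if_neg h1, if_neg h0]]
            rw [ih (d :: rest2) (c :: buf) (by simp at h ⊢; omega)]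
            obtain ⟨t, ts, hts⟩ := splitStd_surj (d :: rest2)
            have hun : unesc (c :: t) = c :: unesc t := by
              by_cases hd : d = '/'
              · subst hd
                rw [splitStd_slash] at hts
                injection hts with hA hB
                subst hA
                simp [unesc]
              · obtain ⟨t', ts', hts'⟩ := splitStd_surj rest2
                rw [splitStd_cons_ne d rest2 t' ts' hd hts'] at hts
                injection hts with hA hB
                subst hA
                by_cases hct : c = '~'
                · subst hct
                  have hd1 : d ≠ '1' := fun hh => h1 ⟨rfl, hh⟩
                  have hd0 : d ≠ '0' := fun hh => h0 ⟨rfl, hh⟩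
                  exact unesc_cons_tilde _ (by simp [hd0]) (by simp [hd1])
                · exact unesc_cons_ne c _ hct
            rw [hts, splitStd_cons_ne c _ t ts hc hts]
            simp [hun]

theorem pvAltLoop_eq (cs buf : List Char) :
    pvAltLoop cs buf =
      (match splitStd cs with
       | [] => []
       | t :: ts => String.ofList (buf.reverse ++ unesc t) ::
                    ts.map (fun u => String.ofList (unesc u))) :=
  pvAltLoop_eq_aux cs.length cs buf (le_refl _)

-- A's per-token double replace equals unesc, at the String level
theorem tok_eq (u : List Char) :
    PySem.Str.replace (PySem.Str.replace (String.ofList u) "~1" "/") "~0" "~" =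
      String.ofList (unesc u) := by
  simp only [PySem.Str.replace, String.toList_ofList]
  have h1 : ("~1" : String).toList = ['~','1'] := by decide
  have h0 : ("~0" : String).toList = ['~','0'] := by decide
  have hs : ("/" : String).toList = ['/'] := by decide
  have ht : ("~" : String).toList = ['~'] := by decide
  rw [h1, h0, hs, ht, replace1_eq, replace0_eq, rep0_rep1_eq_unesc]

-- ===== VERDICT =====
theorem parse_json_pointer_spec : Claim_equal_parse_json_pointer := by
  intro pointer op _ hpre
  unfold Spec_parse_json_pointer parse_json_pointer parse_json_pointer_alt
  by_cases hemp : pointer = ""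
  · simp [hemp]
  · have hsw : PySem.Str.startswith pointer "/" = true := by
      rcases hpre with h | h
      · exact absurd h hemp
      · exact h
    rw [if_neg hemp, if_neg hemp, hsw]
    simp only [Bool.true_eq_false, if_false]
    have hslash : ("/" : String).toList = ['/'] := by decide
    obtain ⟨cs, hcs⟩ : ∃ cs, pointer.toList = '/' :: cs := by
      have hst : PySem.Chars.startswith pointer.toList ("/" : String).toList = true := by
        rw [← PySem.Str.startswith_eq]; exact hsw
      have hpfx : ("/" : String).toList <+: pointer.toList := by
        rw [← PySem.Chars.startswith_iff]; exact hst
      obtain ⟨tail, htail⟩ := hpfx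
      exact ⟨tail, by rw [← htail, hslash]; simp⟩
    have hsplit : PySem.Str.split? pointer "/" =
        some ((splitStd pointer.toList).map String.ofList) := by
      simp only [PySem.Str.split?, PySem.Chars.split?]
      rw [if_neg (by decide)]
      rw [hslash, splitOn_slash]
      rfl
    rw [hsplit, hcs]
    rw [splitStd_slash]
    simp only [List.map_cons, List.drop_succ_cons, List.drop_zero, List.map_map]
    rw [pvAltLoop_eq cs []]
    obtain ⟨t, ts, hts⟩ := splitStd_surj cs
    rw [hts]
    simp [Function.comp_def, tok_eq]
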